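-- pv_equiv track=rewrite | github.com/ottowhite/oversight | extract_eurosys26_abstracts.py | join_hyphenated
-- ===== SOURCE A (Python) =====
-- def join_hyphenated(text: str) -> str:
--     """Join soft hyphenation across line breaks, skipping blank lines.
--
--     Two-column extraction can leave a blank line between a hyphenated
--     word's halves (when the right column is empty on the same row), so we
--     look past blanks for a lowercase continuation before joining.
--     """
--     lines = text.split("\n")
--     out = []
--     i = 0
--     while i < len(lines):
--         line = lines[i].rstrip()
--         if not line:
--             out.append("")
--             i += 1
--             continue
--         while line.endswith("-") and i + 1 < len(lines):
--             j = i + 1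
--             while j < len(lines) and not lines[j].strip():
--                 j += 1
--             if j >= len(lines):
--                 break
--             next_line = lines[j].lstrip()
--             if next_line and next_line[0].islower():
--                 line = (line[:-1] + next_line).rstrip()
--                 i = j
--             else:
--                 break
--         out.append(line)
--         i += 1
--     return "\n".join(out)
-- ===== SOURCE B (Python) =====
-- def join_hyphenated(text: str) -> str:
--     out = []
--     pending = None        # an rstripped line ending in '-', awaiting a lowercase continuation
--     blanks = 0            # blank lines buffered while pending is set
--     for raw in text.split("\n"):
--         if not raw.strip():
--             if pending is None:
--                 out.append("")
--             else:
--                 blanks += 1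
--             continue
--         if pending is not None:
--             stripped = raw.lstrip()
--             if stripped[0].islower():
--                 pending = (pending[:-1] + stripped).rstrip()
--                 blanks = 0
--                 if not pending.endswith("-"):
--                     out.append(pending)
--                     pending = None
--                 continue
--             out.append(pending)
--             out.extend([""] * blanks)
--             pending = None
--             blanks = 0
--         line = raw.rstrip()
--         if line.endswith("-"):
--             pending = line
--         else:
--             out.append(line)
--     if pending is not None:
--         out.append(pending)
--         out.extend([""] * blanks)
--     return "\n".join(out)
-- ===== Notes on version B (the rewrite author's own statement) =====
-- stated objective: alternative
-- what changed: A's index-driven while loop with a nested blank-skipping lookahead scan is replaced by a single forward fold over the lines that carries a pending hyphenated line and a counter of blank lines buffered since it, flushing them in the right order.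
import Mathlib
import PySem

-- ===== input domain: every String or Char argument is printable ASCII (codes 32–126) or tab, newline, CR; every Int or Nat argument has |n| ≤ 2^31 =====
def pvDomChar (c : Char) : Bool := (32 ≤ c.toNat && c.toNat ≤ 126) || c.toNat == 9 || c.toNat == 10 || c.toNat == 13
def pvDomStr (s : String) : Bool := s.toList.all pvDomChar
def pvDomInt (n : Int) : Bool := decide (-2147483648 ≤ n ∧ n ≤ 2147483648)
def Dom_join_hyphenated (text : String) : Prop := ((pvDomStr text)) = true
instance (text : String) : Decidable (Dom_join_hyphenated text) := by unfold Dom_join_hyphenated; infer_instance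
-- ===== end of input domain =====

-- B replaces A's index-based while loop with nested lookahead scans by a single forward
-- fold carrying a pending hyphenated line and a counter of buffered blank lines (objective:
-- alternative decomposition, same cost).

-- ===== PORT A =====
-- inner 'while j < len(lines) and not lines[j].strip(): j += 1'
def aSkip (lines : List (List Char)) (j : Nat) : Nat :=
  if h : j < lines.length then
    if PySem.Chars.strip lines[j] = [] then aSkip lines (j + 1) else j
  else j
termination_by lines.length - j

theorem aSkip_ge (lines : List (List Char)) (j : Nat) : j ≤ aSkip lines j := by
  rw [aSkip]
  split
  · split
    · exact le_trans (Nat.le_succ j) (aSkip_ge lines (j + 1))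
    · exact le_rfl
  · exact le_rfl
termination_by lines.length - j
decreasing_by omega

-- middle 'while line.endswith("-") and i + 1 < len(lines): …' loop, returning (line, i)
def aInner (lines : List (List Char)) (line : List Char) (i : Nat) : List Char × Nat :=
  if PySem.Chars.endswith line ['-'] = true ∧ i + 1 < lines.length then
    -- j := aSkip lines (i + 1), inlined
    if h : aSkip lines (i + 1) < lines.length then
      match PySem.Chars.lstrip lines[aSkip lines (i + 1)] with  -- 'next_line and next_line[0].islower()'
      | c :: cs =>
        if PySem.Chars.islower c then
          aInner lines (PySem.Chars.rstrip (PySem.List.slice line none (some (-1)) ++ (c :: cs)))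
            (aSkip lines (i + 1))
        else (line, i)
      | [] => (line, i)
    else (line, i)
  else (line, i)
termination_by lines.length - i
decreasing_by
  have := aSkip_ge lines (i + 1); omega

theorem aInner_ge (lines : List (List Char)) (line : List Char) (i : Nat) :
    i ≤ (aInner lines line i).2 := by
  rw [aInner]
  split
  · split
    · split
      · split
        next c cs heq hl =>
          have h1 := aInner_ge lines
            (PySem.Chars.rstrip (PySem.List.slice line none (some (-1)) ++ (c :: cs)))
            (aSkip lines (i + 1))
          have h2 := aSkip_ge lines (i + 1)
          omega
        · exact le_rfl
      · exact le_rfl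
    · exact le_rfl
  · exact le_rfl
termination_by lines.length - i
decreasing_by have := aSkip_ge lines (i + 1); omega

-- outer 'while i < len(lines)' loop with accumulator out
def aOuter (lines : List (List Char)) (i : Nat) (out : List (List Char)) : List (List Char) :=
  if h : i < lines.length then
    -- line := lines[i].rstrip(), inlined
    if PySem.Chars.rstrip lines[i] = [] then aOuter lines (i + 1) (out ++ [[]])
    else aOuter lines ((aInner lines (PySem.Chars.rstrip lines[i]) i).2 + 1)
      (out ++ [(aInner lines (PySem.Chars.rstrip lines[i]) i).1])
  else out
termination_by lines.length - i
decreasing_by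
  · omega
  · have := aInner_ge lines (PySem.Chars.rstrip lines[i]) i; omega

def join_hyphenated (text : String) : String :=
  String.ofList (PySem.Chars.join ['\n'] (aOuter (PySem.Chars.splitOn text.toList ['\n']) 0 []))

-- ===== PORT B =====
-- tail of Source B's loop body: 'line = raw.rstrip(); if line.endswith("-"): pending = line else: out.append(line)'
def bTail (out : List (List Char)) (raw : List Char) :
    List (List Char) × Option (List Char) × Nat :=
  -- line := raw.rstrip(), inlined
  if PySem.Chars.endswith (PySem.Chars.rstrip raw) ['-'] then (out, some (PySem.Chars.rstrip raw), 0)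
  else (out ++ [PySem.Chars.rstrip raw], none, 0)

-- one iteration of Source B's for loop; state = (out, pending, blanks)
def bStep (st : List (List Char) × Option (List Char) × Nat) (raw : List Char) :
    List (List Char) × Option (List Char) × Nat :=
  match st with
  | (out, pending, blanks) =>
    if PySem.Chars.strip raw = [] then
      match pending with
      | none => (out ++ [[]], none, blanks)
      | some p => (out, some p, blanks + 1)
    else
      match pending with
      | some p =>
        match PySem.Chars.lstrip raw with     -- 'stripped[0].islower()' (lstrip nonempty: raw is non-blank)
        | c :: cs =>
          if PySem.Chars.islower c then
            -- p' := (pending[:-1] + stripped).rstrip(), inlined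
            if PySem.Chars.endswith (PySem.Chars.rstrip (PySem.List.slice p none (some (-1)) ++ (c :: cs))) ['-'] then
              (out, some (PySem.Chars.rstrip (PySem.List.slice p none (some (-1)) ++ (c :: cs))), 0)
            else (out ++ [PySem.Chars.rstrip (PySem.List.slice p none (some (-1)) ++ (c :: cs))], none, 0)
          else bTail (out ++ [p] ++ List.replicate blanks []) raw
        | [] => bTail (out ++ [p] ++ List.replicate blanks []) raw
      | none => bTail out raw

-- final flush after the loop
def bFinish (st : List (List Char) × Option (List Char) × Nat) : List (List Char) :=
  match st with
  | (out, none, _) => out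
  | (out, some p, blanks) => out ++ [p] ++ List.replicate blanks []

def join_hyphenated_alt (text : String) : String :=
  String.ofList (PySem.Chars.join ['\n']
    (bFinish ((PySem.Chars.splitOn text.toList ['\n']).foldl bStep ([], none, 0))))

-- ===== PRECONDITION & SPEC =====
def Spec_join_hyphenated (text : String) (out : String) : Prop := out = join_hyphenated_alt text
instance (text : String) (out : String) : Decidable (Spec_join_hyphenated text out) := by unfold Spec_join_hyphenated; infer_instance

-- ===== CLAIM (what is proved, stated in full; the proofs are below) =====
def Claim_equal_join_hyphenated : Prop := ∀ (text : String), Dom_join_hyphenated text → Spec_join_hyphenated text (join_hyphenated text)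

-- ===== LEMMAS AND PROOFS =====

-- blankness facts
theorem rstrip_nil_iff (l : List Char) :
    PySem.Chars.rstrip l = [] ↔ PySem.Chars.strip l = [] := by
  simp only [PySem.Chars.strip, PySem.Chars.rstrip, PySem.Chars.lstrip,
    List.reverse_eq_nil_iff, List.dropWhile_eq_nil_iff, List.mem_reverse]
  constructor
  · intro h c hc
    exact h c ((List.dropWhile_sublist _).subset hc)
  · intro h c hc
    have hc' : c ∈ List.takeWhile PySem.Chars.isspace l ++ List.dropWhile PySem.Chars.isspace l := by
      rw [List.takeWhile_append_dropWhile]; exact hc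
    rcases List.mem_append.1 hc' with h1 | h1
    · exact List.mem_takeWhile_imp h1
    · exact h c h1

-- the lookahead loop of A, phrased on the suffix of lines after the current line
def joinL (line : List Char) (rest : List (List Char)) : List Char × List (List Char) :=
  if PySem.Chars.endswith line ['-'] = true then
    match h : rest.dropWhile (fun l => PySem.Chars.strip l == []) with
    | [] => (line, rest)
    | nb :: t =>
      match PySem.Chars.lstrip nb with
      | c :: cs =>
        if PySem.Chars.islower c then
          joinL (PySem.Chars.rstrip (PySem.List.slice line none (some (-1)) ++ (c :: cs))) t
        else (line, rest)
      | [] => (line, rest)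
  else (line, rest)
termination_by rest.length
decreasing_by
  have hs : List.IsSuffix (nb :: t) rest := h ▸ List.dropWhile_suffix _
  have := hs.length_le; simp at this; omega

theorem joinL_len (line : List Char) (rest : List (List Char)) :
    (joinL line rest).2.length ≤ rest.length := by
  rw [joinL]
  split
  · split
    · exact le_rfl
    next nb t heq =>
      have hs : List.IsSuffix (nb :: t) rest := heq ▸ List.dropWhile_suffix _
      have hlen : t.length < rest.length := by
        have := hs.length_le; simp only [List.length_cons] at this; omega
      split
      · split
        · exact le_trans (joinL_len _ t) (by omega)
        · exact le_rfl
      · exact le_rfl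
  · exact le_rfl
termination_by rest.length
decreasing_by omega

-- A's whole algorithm as a structural recursion over the list of lines
def proc (lines : List (List Char)) : List (List Char) :=
  match lines with
  | [] => []
  | l :: rest =>
    if PySem.Chars.rstrip l = [] then [] :: proc rest
    else (joinL (PySem.Chars.rstrip l) rest).1 :: proc (joinL (PySem.Chars.rstrip l) rest).2
termination_by lines.length
decreasing_by
  all_goals simp only [List.length_cons]
  · omega
  · have := joinL_len (PySem.Chars.rstrip l) rest; omega

theorem aSkip_dropWhile (lines : List (List Char)) (j : Nat) :
    (lines.drop j).dropWhile (fun l => PySem.Chars.strip l == []) = lines.drop (aSkip lines j) := by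
  rw [aSkip]
  split
  next h =>
    have hd : lines.drop j = lines[j] :: lines.drop (j + 1) := by
      rw [List.drop_eq_getElem_cons h]
    split
    next hb =>
      rw [hd, List.dropWhile_cons_of_pos (by simpa using hb)]
      exact aSkip_dropWhile lines (j + 1)
    next hb =>
      rw [hd, List.dropWhile_cons_of_neg (by simpa using hb)]
  next h =>
    rw [List.drop_eq_nil_of_le (by omega), List.dropWhile_nil]
termination_by lines.length - j
decreasing_by omega

theorem aInner_spec (lines : List (List Char)) (line : List Char) (i : Nat) :
    joinL line (lines.drop (i + 1)) =
      ((aInner lines line i).1, lines.drop ((aInner lines line i).2 + 1)) := by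
  rw [aInner, joinL]
  by_cases he : PySem.Chars.endswith line ['-'] = true
  · simp only [he, true_and, if_true]
    by_cases hi : i + 1 < lines.length
    · simp only [hi, if_true]
      by_cases hj : aSkip lines (i + 1) < lines.length
      · simp only [dif_pos hj]
        have hd : lines.drop (aSkip lines (i + 1)) =
            lines[aSkip lines (i + 1)] :: lines.drop (aSkip lines (i + 1) + 1) := by
          rw [List.drop_eq_getElem_cons hj]
        split
        next heq =>
          rw [aSkip_dropWhile, hd] at heq
          exact absurd heq (List.cons_ne_nil _ _)
        next nb t heq =>
          rw [aSkip_dropWhile, hd] at heq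
          injection heq with h1 h2
          subst h1; subst h2
          cases hnl : PySem.Chars.lstrip lines[aSkip lines (i + 1)] with
          | nil => simp
          | cons c cs =>
            by_cases hlow : PySem.Chars.islower c = true
            · simp only [hlow, if_true]
              exact aInner_spec lines _ (aSkip lines (i + 1))
            · simp [hlow]
      · simp only [dif_neg hj]
        have hnil : lines.drop (aSkip lines (i + 1)) = [] := List.drop_eq_nil_of_le (by omega)
        split
        next heq => rfl
        next nb t heq =>
          rw [aSkip_dropWhile, hnil] at heq
          exact absurd heq.symm (List.cons_ne_nil _ _)
    · simp only [hi, if_false]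
      have hnil : lines.drop (i + 1) = [] := List.drop_eq_nil_of_le (by omega)
      split
      next heq => rfl
      next nb t heq =>
        rw [hnil] at heq
        exact absurd heq.symm (List.cons_ne_nil _ _)
  · simp [he]
termination_by lines.length - i
decreasing_by have := aSkip_ge lines (i + 1); omega

theorem aOuter_proc (lines : List (List Char)) (i : Nat) (out : List (List Char)) :
    aOuter lines i out = out ++ proc (lines.drop i) := by
  rw [aOuter]
  by_cases h : i < lines.length
  · rw [dif_pos h]
    have hd : lines.drop i = lines[i] :: lines.drop (i + 1) := by
      rw [List.drop_eq_getElem_cons h]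
    rw [hd, proc]
    by_cases hb : PySem.Chars.rstrip lines[i] = []
    · rw [if_pos hb, if_pos hb, aOuter_proc lines (i + 1)]
      simp
    · rw [if_neg hb, if_neg hb, aOuter_proc lines ((aInner lines (PySem.Chars.rstrip lines[i]) i).2 + 1)]
      have hspec := aInner_spec lines (PySem.Chars.rstrip lines[i]) i
      rw [show (joinL (PySem.Chars.rstrip lines[i]) (lines.drop (i + 1))).1 =
            (aInner lines (PySem.Chars.rstrip lines[i]) i).1 from by rw [hspec],
          show (joinL (PySem.Chars.rstrip lines[i]) (lines.drop (i + 1))).2 =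
            lines.drop ((aInner lines (PySem.Chars.rstrip lines[i]) i).2 + 1) from by rw [hspec]]
      simp
  · rw [dif_neg h, List.drop_eq_nil_of_le (by omega), proc]
    simp
termination_by lines.length - i
decreasing_by
  all_goals first
  | omega
  | (have := aInner_ge lines (PySem.Chars.rstrip lines[i]) i; omega)

theorem proc_blanks (bs rest : List (List Char)) (hb : ∀ b ∈ bs, PySem.Chars.strip b = []) :
    proc (bs ++ rest) = List.replicate bs.length [] ++ proc rest := by
  induction bs with
  | nil => simp
  | cons b bs ih =>
    have hb0 : PySem.Chars.rstrip b = [] := (rstrip_nil_iff b).2 (hb b (by simp))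
    rw [List.cons_append, proc, if_pos hb0, ih (fun x hx => hb x (List.mem_cons_of_mem _ hx))]
    simp [List.replicate_succ]

theorem dropWhile_blanks (bs : List (List Char)) (l : List Char) (rest : List (List Char))
    (hb : ∀ b ∈ bs, PySem.Chars.strip b = []) (hl : PySem.Chars.strip l ≠ []) :
    (bs ++ l :: rest).dropWhile (fun x => PySem.Chars.strip x == []) = l :: rest := by
  induction bs with
  | nil => exact List.dropWhile_cons_of_neg (by simpa using hl)
  | cons b bs ih =>
    rw [List.cons_append, List.dropWhile_cons_of_pos (by simpa using hb b (by simp))]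
    exact ih (fun x hx => hb x (by simp [hx]))

theorem joinL_stop (p : List Char) (bs : List (List Char))
    (hbs : ∀ b ∈ bs, PySem.Chars.strip b = []) : joinL p bs = (p, bs) := by
  rw [joinL]
  split
  · split
    next heq => rfl
    next nb t heq =>
      have hnil : bs.dropWhile (fun x => PySem.Chars.strip x == []) = [] :=
        List.dropWhile_eq_nil_iff.2 (fun x hx => by simp [hbs x hx])
      rw [hnil] at heq
      exact absurd heq.symm (List.cons_ne_nil _ _)
  · rfl

theorem joinL_nohyp (p : List Char) (rest : List (List Char))
    (hp : ¬ PySem.Chars.endswith p ['-'] = true) : joinL p rest = (p, rest) := by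
  rw [joinL, if_neg hp]

theorem joinL_step (p l : List Char) (bs t : List (List Char))
    (hp : PySem.Chars.endswith p ['-'] = true)
    (hbs : ∀ b ∈ bs, PySem.Chars.strip b = []) (hl : PySem.Chars.strip l ≠ []) :
    joinL p (bs ++ l :: t) =
      match PySem.Chars.lstrip l with
      | c :: cs =>
        if PySem.Chars.islower c then
          joinL (PySem.Chars.rstrip (PySem.List.slice p none (some (-1)) ++ (c :: cs))) t
        else (p, bs ++ l :: t)
      | [] => (p, bs ++ l :: t) := by
  rw [joinL, if_pos hp]
  split
  next heq =>
    rw [dropWhile_blanks bs l t hbs hl] at heq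
    exact absurd heq (List.cons_ne_nil _ _)
  next nb t' heq =>
    rw [dropWhile_blanks bs l t hbs hl] at heq
    injection heq with e1 e2
    subst e1; subst e2
    rfl

theorem ML_base (out : List (List Char)) (p : List Char) (bs : List (List Char))
    (hbs : ∀ b ∈ bs, PySem.Chars.strip b = []) :
    bFinish (([] : List (List Char)).foldl bStep (out, some p, bs.length)) =
      out ++ (joinL p (bs ++ [])).1 :: proc (joinL p (bs ++ [])).2 := by
  rw [List.append_nil, joinL_stop p bs hbs]
  simp only [List.foldl_nil, bFinish]
  have hpb : proc bs = List.replicate bs.length [] := by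
    have := proc_blanks bs [] hbs
    simpa [proc] using this
  rw [hpb]
  simp

theorem ML (n : Nat) :
    (∀ (rest : List (List Char)) (out : List (List Char)), rest.length ≤ n →
      bFinish (rest.foldl bStep (out, none, 0)) = out ++ proc rest) ∧
    (∀ (rest : List (List Char)) (out : List (List Char)) (p : List Char) (bs : List (List Char)),
      rest.length ≤ n → (∀ b ∈ bs, PySem.Chars.strip b = []) →
      PySem.Chars.endswith p ['-'] = true →
      bFinish (rest.foldl bStep (out, some p, bs.length)) =
        out ++ (joinL p (bs ++ rest)).1 :: proc (joinL p (bs ++ rest)).2) := by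
  induction n with
  | zero =>
    constructor
    · intro rest out hlen
      rw [List.length_eq_zero_iff.1 (Nat.le_zero.1 hlen)]
      simp [bFinish, proc]
    · intro rest out p bs hlen hbs hp
      rw [List.length_eq_zero_iff.1 (Nat.le_zero.1 hlen)]
      exact ML_base out p bs hbs
  | succ n ih =>
    obtain ⟨ihM, ihL⟩ := ih
    have M' : ∀ (rest out : List (List Char)), rest.length ≤ n + 1 →
        bFinish (rest.foldl bStep (out, none, 0)) = out ++ proc rest := by
      intro rest out hlen
      cases rest with
      | nil => simp [bFinish, proc]
      | cons l t =>
        have hlt : t.length ≤ n := by simp only [List.length_cons] at hlen; omega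
        simp only [List.foldl_cons]
        by_cases hbl : PySem.Chars.strip l = []
        · rw [show bStep (out, none, 0) l = (out ++ [[]], none, 0) from by simp [bStep, hbl],
              ihM t (out ++ [[]]) hlt, proc, if_pos ((rstrip_nil_iff l).2 hbl)]
          simp
        · rw [show bStep (out, none, 0) l = bTail out l from by simp [bStep, hbl]]
          by_cases hh : PySem.Chars.endswith (PySem.Chars.rstrip l) ['-'] = true
          · rw [show bTail out l = (out, some (PySem.Chars.rstrip l), 0) from by simp [bTail, hh]]
            have hL := ihL t out (PySem.Chars.rstrip l) [] hlt (by simp) hh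
            simp only [List.length_nil, List.nil_append] at hL
            rw [hL, proc, if_neg (fun hc => hbl ((rstrip_nil_iff l).1 hc))]
          · rw [show bTail out l = (out ++ [PySem.Chars.rstrip l], none, 0) from by simp [bTail, hh],
                ihM t _ hlt, proc, if_neg (fun hc => hbl ((rstrip_nil_iff l).1 hc)),
                joinL_nohyp _ t hh]
            simp
    refine ⟨M', ?_⟩
    intro rest out p bs hlen hbs hp
    cases rest with
    | nil => exact ML_base out p bs hbs
    | cons l t =>
      have hlt : t.length ≤ n := by simp only [List.length_cons] at hlen; omega
      simp only [List.foldl_cons]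
      by_cases hbl : PySem.Chars.strip l = []
      · rw [show bStep (out, some p, bs.length) l = (out, some p, (bs ++ [l]).length) from by
              simp [bStep, hbl],
            ihL t out p (bs ++ [l]) hlt
              (fun b hb => by rcases List.mem_append.1 hb with h | h
                              exacts [hbs b h, by rw [List.mem_singleton.1 h]; exact hbl]) hp]
        simp
      · have hstep := joinL_step p l bs t hp hbs hbl
        cases hnl : PySem.Chars.lstrip l with
        | nil =>
          rw [hnl] at hstep
          simp only [] at hstep
          rw [show bStep (out, some p, bs.length) l =
                bStep (out ++ [p] ++ List.replicate bs.length [], none, 0) l from by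
              simp [bStep, hbl, hnl],
            show List.foldl bStep (bStep (out ++ [p] ++ List.replicate bs.length [], none, 0) l) t =
                (l :: t).foldl bStep (out ++ [p] ++ List.replicate bs.length [], none, 0) from rfl,
            M' (l :: t) _ hlen, hstep, proc_blanks bs (l :: t) hbs]
          simp
        | cons c cs =>
          rw [hnl] at hstep
          simp only [] at hstep
          by_cases hlow : PySem.Chars.islower c = true
          · rw [if_pos hlow] at hstep
            by_cases hp' : PySem.Chars.endswith
                (PySem.Chars.rstrip (PySem.List.slice p none (some (-1)) ++ (c :: cs))) ['-'] = true
            · rw [show bStep (out, some p, bs.length) l =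
                    (out, some (PySem.Chars.rstrip (PySem.List.slice p none (some (-1)) ++ (c :: cs))), 0)
                    from by simp [bStep, hbl, hnl, hlow, hp']]
              have hL := ihL t out _ [] hlt (by simp) hp'
              simp only [List.length_nil, List.nil_append] at hL
              rw [hL, hstep]
            · rw [show bStep (out, some p, bs.length) l =
                    (out ++ [PySem.Chars.rstrip (PySem.List.slice p none (some (-1)) ++ (c :: cs))], none, 0)
                    from by simp [bStep, hbl, hnl, hlow, hp'],
                  ihM t _ hlt, hstep, joinL_nohyp _ t hp']
              simp
          · rw [if_neg hlow] at hstep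
            rw [show bStep (out, some p, bs.length) l =
                  bStep (out ++ [p] ++ List.replicate bs.length [], none, 0) l from by
                simp [bStep, hbl, hnl, hlow],
              show List.foldl bStep (bStep (out ++ [p] ++ List.replicate bs.length [], none, 0) l) t =
                  (l :: t).foldl bStep (out ++ [p] ++ List.replicate bs.length [], none, 0) from rfl,
              M' (l :: t) _ hlen, hstep, proc_blanks bs (l :: t) hbs]
            simp

-- ===== VERDICT (by name: the statement is the Claim_ definition above) =====
theorem join_hyphenated_spec : Claim_equal_join_hyphenated := by
  intro text _
  unfold Spec_join_hyphenated join_hyphenated join_hyphenated_alt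
  have h1 := aOuter_proc (PySem.Chars.splitOn text.toList ['\n']) 0 []
  have h2 := (ML (PySem.Chars.splitOn text.toList ['\n']).length).1
      (PySem.Chars.splitOn text.toList ['\n']) [] le_rfl
  simp at h1 h2
  rw [h1, h2]
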